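-- pv_equiv track=rewrite | github.com/Ehco1996/PythonPractice | data-analysis/test/project3.py | winnowing
-- ===== SOURCE A (Python) =====
-- def winnowing(hashlist, t, n):
--     '''
--     确定阀值t，所有长度超过t的hash值均会被匹配到，
--     确定阀值n，所有长度小于n的hash值均会被忽略。
--     则我们的窗口长度为W=t-n+1
--
--     返回特征指纹的字典。特征即为窗口字段的最小值
--     返回的字典key为位置，value 为最小值
--     '''
--     window = t - n + 1
--     minValue = minPos = 0
--     fingerprint = {}
--     for i in range(len(hashlist) - window + 1):
--         temp = hashlist[i:i + window]
--         minValue = temp[0]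
--         minPos = 0
--         # 开始找出最小值
--         for j in range(window):
--             if temp[j] < minValue:
--                 minValue = temp[j]
--                 minPos = j
--         # 将找到的最小值存入字典
--         if (i + minPos) not in fingerprint.keys():
--             fingerprint[i + minPos] = minValue
--     return fingerprint
-- ===== SOURCE B (Python) =====
-- def winnowing(hashlist, t, n):
--     '''Sliding-window minimum fingerprints: key = position, value = window minimum.
--     Incremental: reuse the previous window's leftmost minimum; rescan only when
--     it slides out of the window; dedupe consecutive repeats instead of a dict test.'''
--     window = t - n + 1
--     out = []
--     pos, val = -1, 0
--     for i in range(len(hashlist) - window + 1):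
--         if pos < i:
--             # previous minimum left the window: rescan this window
--             pos, val = i, hashlist[i]
--             for q in range(i + 1, i + window):
--                 if hashlist[q] < val:
--                     pos, val = q, hashlist[q]
--         else:
--             # only the entering element can beat the current minimum
--             q = i + window - 1
--             if hashlist[q] < val:
--                 pos, val = q, hashlist[q]
--         if not out or out[-1][0] != pos:
--             out.append((pos, val))
--     return dict(out)
-- ===== Notes on version B (the rewrite author's own statement) =====
-- stated objective: alternative
-- what changed: Instead of rescanning every window slice and testing a dict for each key, B carries the previous window's leftmost minimum across windows (rescanning only when it slides out, otherwise comparing just the entering element) and dedupes consecutive repeated positions in a list, building the dict once at the end.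
import Mathlib
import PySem

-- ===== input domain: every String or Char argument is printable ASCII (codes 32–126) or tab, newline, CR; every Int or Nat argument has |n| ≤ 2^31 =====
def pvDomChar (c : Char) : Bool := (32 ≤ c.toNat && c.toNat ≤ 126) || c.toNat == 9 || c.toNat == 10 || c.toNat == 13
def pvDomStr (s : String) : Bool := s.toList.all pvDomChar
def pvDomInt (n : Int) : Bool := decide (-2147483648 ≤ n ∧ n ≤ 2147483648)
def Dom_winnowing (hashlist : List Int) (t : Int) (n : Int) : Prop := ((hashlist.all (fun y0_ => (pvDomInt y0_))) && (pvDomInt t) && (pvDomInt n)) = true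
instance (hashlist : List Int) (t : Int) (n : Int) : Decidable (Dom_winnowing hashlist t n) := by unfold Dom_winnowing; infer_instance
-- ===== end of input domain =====

-- B carries the previous window's leftmost minimum across windows (rescanning only when it
-- slides out) and dedupes consecutive repeated positions in a list, building the dict once
-- at the end.


-- ===== PORT A =====
def winnowing (hashlist : List Int) (t : Int) (n : Int) : List (Int × Int) :=
  let window := t - n + 1
  let fingerprint :=
    (PySem.List.pyRange 0 (PySem.List.len hashlist - window + 1) 1).foldl
      (fun (fp : PySem.Dict Int Int) i =>
        let temp := PySem.List.slice hashlist (some i) (some (i + window))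
        -- minValue = temp[0]; minPos = 0   (temp[0] raises IndexError when window ≤ 0: excluded by Pre_)
        let s :=
          (PySem.List.pyRange 0 window 1).foldl
            (fun (s : Int × Int) j =>
              if PySem.List.pyGetD temp j 0 < s.1 then (PySem.List.pyGetD temp j 0, j) else s)
            (PySem.List.pyGetD temp 0 0, 0)
        -- if (i + minPos) not in fingerprint.keys(): fingerprint[i + minPos] = minValue
        if fp.contains (i + s.2) then fp else fp.insert (i + s.2) s.1)
      PySem.Dict.empty
  fingerprint.items

-- ===== PORT B =====
def winnowing_alt (hashlist : List Int) (t : Int) (n : Int) : List (Int × Int) :=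
  let window := t - n + 1
  let st :=
    (PySem.List.pyRange 0 (PySem.List.len hashlist - window + 1) 1).foldl
      (fun (st : List (Int × Int) × Int × Int) i =>
        -- st = (out, pos, val)
        let pv :=
          if st.2.1 < i then
            -- previous minimum left the window: rescan this window
            (PySem.List.pyRange (i + 1) (i + window) 1).foldl
              (fun (pv : Int × Int) q =>
                if PySem.List.pyGetD hashlist q 0 < pv.2 then (q, PySem.List.pyGetD hashlist q 0)
                else pv)
              (i, PySem.List.pyGetD hashlist i 0)
          else
            -- only the entering element can beat the current minimum
            if PySem.List.pyGetD hashlist (i + window - 1) 0 < st.2.2 then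
              (i + window - 1, PySem.List.pyGetD hashlist (i + window - 1) 0)
            else st.2
        -- if not out or out[-1][0] != pos: out.append((pos, val))
        let out :=
          if st.1 = [] ∨ (PySem.List.pyGetD st.1 (-1) (0, 0)).1 ≠ pv.1 then st.1 ++ [pv] else st.1
        (out, pv))
      ([], -1, 0)
  (PySem.Dict.ofList st.1).items

-- ===== PRECONDITION & SPEC =====
-- A evaluates temp[0] on an empty slice (IndexError) exactly when the window t - n + 1 ≤ 0,
-- on every hashlist; Pre_ excludes precisely those inputs (B raises IndexError there too).
def Pre_winnowing (hashlist : List Int) (t : Int) (n : Int) : Prop := n ≤ t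
instance (hashlist : List Int) (t : Int) (n : Int) : Decidable (Pre_winnowing hashlist t n) := by unfold Pre_winnowing; infer_instance
def pvWitness_winnowing : List Int × Int × Int := ([3, 1, 4, 1, 5], 2, 1)
def Spec_winnowing (hashlist : List Int) (t : Int) (n : Int) (out : List (Int × Int)) : Prop := out = winnowing_alt hashlist t n
instance (hashlist : List Int) (t : Int) (n : Int) (out : List (Int × Int)) : Decidable (Spec_winnowing hashlist t n out) := by unfold Spec_winnowing; infer_instance

-- ===== CLAIM (what is proved, stated in full; the proofs are below) =====
def Claim_equal_winnowing : Prop := ∀ (hashlist : List Int) (t : Int) (n : Int), Dom_winnowing hashlist t n → Pre_winnowing hashlist t n → Spec_winnowing hashlist t n (winnowing hashlist t n)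

-- ===== LEMMAS AND PROOFS =====

-- (p, v) is the leftmost minimum of the width-w window starting at i (read through pyGetD).
def IsWMin (h : List Int) (w i p v : Int) : Prop :=
  i ≤ p ∧ p < i + w ∧ v = PySem.List.pyGetD h p 0 ∧
  (∀ q, i ≤ q → q < p → v < PySem.List.pyGetD h q 0) ∧
  (∀ q, p < q → q < i + w → v ≤ PySem.List.pyGetD h q 0)

theorem IsWMin.uniq {h : List Int} {w i p v p' v' : Int}
    (h1 : IsWMin h w i p v) (h2 : IsWMin h w i p' v') : p = p' ∧ v = v' := by
  obtain ⟨a1, b1, c1, l1, r1⟩ := h1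
  obtain ⟨a2, b2, c2, l2, r2⟩ := h2
  rcases lt_trichotomy p p' with hlt | heq | hgt
  · have t1 := l2 p a1 hlt
    have t2 := r1 p' hlt b2
    rw [← c1] at t1; rw [← c2] at t2; omega
  · subst heq; exact ⟨rfl, c1.trans c2.symm⟩
  · have t1 := l1 p' a2 hgt
    have t2 := r2 p hgt b1
    rw [← c2] at t1; rw [← c1] at t2; omega

theorem IsWMin.mono {h : List Int} {w i p v p' v' : Int}
    (h1 : IsWMin h w i p v) (h2 : IsWMin h w (i + 1) p' v') : p ≤ p' := by
  obtain ⟨a1, b1, c1, l1, r1⟩ := h1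
  obtain ⟨a2, b2, c2, l2, r2⟩ := h2
  by_contra hc
  rw [Int.not_le] at hc
  have t1 := l1 p' (by omega) hc
  have t2 := r2 p hc (by omega)
  rw [← c2] at t1; rw [← c1] at t2; omega

-- B's incremental branch keeps the leftmost minimum as the window slides one step.
theorem incr_spec {h : List Int} {w i p v : Int}
    (hsp : IsWMin h w (i - 1) p v) (hpi : i ≤ p) :
    IsWMin h w i
      (if PySem.List.pyGetD h (i + w - 1) 0 < v then (i + w - 1, PySem.List.pyGetD h (i + w - 1) 0) else (p, v)).1
      (if PySem.List.pyGetD h (i + w - 1) 0 < v then (i + w - 1, PySem.List.pyGetD h (i + w - 1) 0) else (p, v)).2 := by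
  obtain ⟨a1, b1, c1, l1, r1⟩ := hsp
  split_ifs with hq
  · refine ⟨by omega, by omega, rfl, ?_, ?_⟩
    · intro q hq1 hq2
      rcases lt_trichotomy q p with hlt | heq | hgt
      · have := l1 q (by omega) hlt; omega
      · subst heq; omega
      · have := r1 q hgt (by omega); omega
    · intro q hq1 hq2; omega
  · refine ⟨hpi, by omega, c1, ?_, ?_⟩
    · intro q hq1 hq2; exact l1 q (by omega) hq2
    · intro q hq1 hq2
      rcases lt_or_ge q (i - 1 + w) with hlt | hge
      · exact r1 q hq1 hlt
      · have : q = i + w - 1 := by omega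
        subst this; omega

-- B's rescan loop computes the leftmost window minimum.
theorem wfold_spec (h : List Int) (i : Int) (k : Nat) :
    IsWMin h ((k : Int) + 1) i
      ((PySem.List.pyRange (i + 1) (i + 1 + (k : Int)) 1).foldl
        (fun (pv : Int × Int) q =>
          if PySem.List.pyGetD h q 0 < pv.2 then (q, PySem.List.pyGetD h q 0) else pv)
        (i, PySem.List.pyGetD h i 0)).1
      ((PySem.List.pyRange (i + 1) (i + 1 + (k : Int)) 1).foldl
        (fun (pv : Int × Int) q =>
          if PySem.List.pyGetD h q 0 < pv.2 then (q, PySem.List.pyGetD h q 0) else pv)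
        (i, PySem.List.pyGetD h i 0)).2 := by
  induction k with
  | zero =>
    rw [show i + 1 + ((0 : Nat) : Int) = i + 1 by omega,
        PySem.List.pyRange_one_eq_nil (by omega)]
    simp only [List.foldl_nil]
    exact ⟨le_refl i, by omega, rfl, by omega, by omega⟩
  | succ m ih =>
    rw [show i + 1 + ((m + 1 : Nat) : Int) = (i + 1 + (m : Int)) + 1 by push_cast; omega,
        PySem.List.pyRange_one_succ_right (by omega), List.foldl_append]
    obtain ⟨a1, b1, c1, l1, r1⟩ := ih
    set F := ((PySem.List.pyRange (i + 1) (i + 1 + (m : Int)) 1).foldl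
        (fun (pv : Int × Int) q =>
          if PySem.List.pyGetD h q 0 < pv.2 then (q, PySem.List.pyGetD h q 0) else pv)
        (i, PySem.List.pyGetD h i 0)) with hF
    simp only [List.foldl_cons, List.foldl_nil]
    split_ifs with hq
    · refine ⟨by omega, by push_cast; omega, rfl, ?_, ?_⟩
      · intro q hq1 hq2
        rcases lt_trichotomy q F.1 with hlt | heq | hgt
        · have := l1 q hq1 hlt; omega
        · subst heq; omega
        · have := r1 q hgt (by omega); omega
      · intro q hq1 hq2; push_cast at hq2; omega
    · refine ⟨a1, by push_cast; omega, c1, l1, ?_⟩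
      intro q hq1 hq2
      rcases lt_or_ge q (i + ((m : Int) + 1)) with hlt | hge
      · exact r1 q hq1 hlt
      · have : q = i + 1 + (m : Int) := by push_cast at hq2; omega
        subst this; omega

-- A's inner loop (read through hashlist instead of the slice) computes the leftmost window minimum.
theorem afold_spec (h : List Int) (i : Int) (k : Nat) :
    IsWMin h ((k : Int) + 1) i
      (i + ((PySem.List.pyRange 0 ((k : Int) + 1) 1).foldl
        (fun (s : Int × Int) j =>
          if PySem.List.pyGetD h (i + j) 0 < s.1 then (PySem.List.pyGetD h (i + j) 0, j) else s)
        (PySem.List.pyGetD h i 0, 0)).2)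
      ((PySem.List.pyRange 0 ((k : Int) + 1) 1).foldl
        (fun (s : Int × Int) j =>
          if PySem.List.pyGetD h (i + j) 0 < s.1 then (PySem.List.pyGetD h (i + j) 0, j) else s)
        (PySem.List.pyGetD h i 0, 0)).1 := by
  induction k with
  | zero =>
    rw [show ((0 : Nat) : Int) + 1 = 0 + 1 by omega,
        PySem.List.pyRange_one_succ_right (by omega),
        PySem.List.pyRange_one_eq_nil (by omega)]
    simp only [List.nil_append, List.foldl_cons, List.foldl_nil]
    rw [show i + (0 : Int) = i by omega]
    simp only [lt_irrefl, if_false]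
    exact ⟨by omega, by omega, by rw [add_zero], by omega, by omega⟩
  | succ m ih =>
    rw [show ((m + 1 : Nat) : Int) + 1 = ((m : Int) + 1) + 1 by push_cast; omega,
        PySem.List.pyRange_one_succ_right (by omega), List.foldl_append]
    obtain ⟨a1, b1, c1, l1, r1⟩ := ih
    set F := ((PySem.List.pyRange 0 ((m : Int) + 1) 1).foldl
        (fun (s : Int × Int) j =>
          if PySem.List.pyGetD h (i + j) 0 < s.1 then (PySem.List.pyGetD h (i + j) 0, j) else s)
        (PySem.List.pyGetD h i 0, 0)) with hF
    simp only [List.foldl_cons, List.foldl_nil]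
    split_ifs with hq
    · refine ⟨by omega, by push_cast; omega, rfl, ?_, ?_⟩
      · intro q hq1 hq2
        rcases lt_trichotomy q (i + F.2) with hlt | heq | hgt
        · have := l1 q hq1 hlt; omega
        · subst heq; omega
        · have := r1 q hgt (by omega); omega
      · intro q hq1 hq2; omega
    · refine ⟨a1, by omega, c1, l1, ?_⟩
      intro q hq1 hq2
      rcases lt_or_ge q (i + ((m : Int) + 1)) with hlt | hge
      · exact r1 q hq1 hlt
      · have : q = i + ((m : Int) + 1) := by omega
        subst this; omega

-- Reading a slice element is reading the list at the shifted index.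
theorem slice_getD (h : List Int) (i w j : Int) (h0 : 0 ≤ i) (hj0 : 0 ≤ j) (hjw : j < w)
    (hlen : i + w ≤ PySem.List.len h) :
    PySem.List.pyGetD (PySem.List.slice h (some i) (some (i + w))) j 0 =
      PySem.List.pyGetD h (i + j) 0 := by
  rw [PySem.List.len_eq] at hlen
  rw [PySem.List.slice_toNat h h0 (by omega)]
  have hL : (List.take ((i + w).toNat - i.toNat) (List.drop i.toNat h)).length = w.toNat := by
    simp only [List.length_take, List.length_drop]
    omega
  rw [show j = ((j.toNat : Nat) : Int) by omega, PySem.List.pyGetD_natCast]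
  rw [show i + ((j.toNat : Nat) : Int) = ((i.toNat + j.toNat : Nat) : Int) by omega,
      PySem.List.pyGetD_natCast]
  rw [List.getD_eq_getElem _ _ (by rw [hL]; omega),
      List.getD_eq_getElem _ _ (by omega),
      List.getElem_take, List.getElem_drop]

-- proof-side names for the two step functions (definitionally the ports' loop bodies)
def stepA (h : List Int) (w : Int) (fp : PySem.Dict Int Int) (i : Int) : PySem.Dict Int Int :=
  let temp := PySem.List.slice h (some i) (some (i + w))
  let s :=
    (PySem.List.pyRange 0 w 1).foldl
      (fun (s : Int × Int) j =>
        if PySem.List.pyGetD temp j 0 < s.1 then (PySem.List.pyGetD temp j 0, j) else s)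
      (PySem.List.pyGetD temp 0 0, 0)
  if fp.contains (i + s.2) then fp else fp.insert (i + s.2) s.1

def innerA (h : List Int) (w i : Int) : Int × Int :=
  (PySem.List.pyRange 0 w 1).foldl
    (fun (s : Int × Int) j =>
      if PySem.List.pyGetD (PySem.List.slice h (some i) (some (i + w))) j 0 < s.1 then
        (PySem.List.pyGetD (PySem.List.slice h (some i) (some (i + w))) j 0, j)
      else s)
    (PySem.List.pyGetD (PySem.List.slice h (some i) (some (i + w))) 0 0, 0)

theorem stepA_eq (h : List Int) (w : Int) (fp : PySem.Dict Int Int) (i : Int) :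
    stepA h w fp i =
      if fp.contains (i + (innerA h w i).2) then fp
      else fp.insert (i + (innerA h w i).2) (innerA h w i).1 := rfl

def rescanB (h : List Int) (w i : Int) : Int × Int :=
  (PySem.List.pyRange (i + 1) (i + w) 1).foldl
    (fun (pv : Int × Int) q =>
      if PySem.List.pyGetD h q 0 < pv.2 then (q, PySem.List.pyGetD h q 0) else pv)
    (i, PySem.List.pyGetD h i 0)

def newpv (h : List Int) (w : Int) (st : List (Int × Int) × Int × Int) (i : Int) : Int × Int :=
  if st.2.1 < i then rescanB h w i
  else
    if PySem.List.pyGetD h (i + w - 1) 0 < st.2.2 then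
      (i + w - 1, PySem.List.pyGetD h (i + w - 1) 0)
    else st.2

def stepB (h : List Int) (w : Int) (st : List (Int × Int) × Int × Int) (i : Int) :
    List (Int × Int) × Int × Int :=
  let pv := newpv h w st i
  let out :=
    if st.1 = [] ∨ (PySem.List.pyGetD st.1 (-1) (0, 0)).1 ≠ pv.1 then st.1 ++ [pv] else st.1
  (out, pv)

theorem stepB_eq (h : List Int) (w : Int) (st : List (Int × Int) × Int × Int) (i : Int) :
    stepB h w st i =
      (if st.1 = [] ∨ (PySem.List.pyGetD st.1 (-1) (0, 0)).1 ≠ (newpv h w st i).1 then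
          st.1 ++ [newpv h w st i]
        else st.1,
        newpv h w st i) := rfl

def foldA (h : List Int) (w : Int) (k : Nat) : PySem.Dict Int Int :=
  (PySem.List.pyRange 0 (k : Int) 1).foldl (stepA h w) PySem.Dict.empty

def foldB (h : List Int) (w : Int) (k : Nat) : List (Int × Int) × Int × Int :=
  (PySem.List.pyRange 0 (k : Int) 1).foldl (stepB h w) ([], -1, 0)

theorem rescanB_min (h : List Int) (w i : Int) (hw : 1 ≤ w) :
    IsWMin h w i (rescanB h w i).1 (rescanB h w i).2 := by
  obtain ⟨k, rfl⟩ : ∃ k : Nat, w = (k : Int) + 1 := ⟨(w - 1).toNat, by omega⟩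
  unfold rescanB
  rw [show i + ((k : Int) + 1) = i + 1 + (k : Int) by ring]
  exact wfold_spec h i k

theorem innerA_min (h : List Int) (w i : Int) (hw : 1 ≤ w) (hi : 0 ≤ i)
    (hlen : i + w ≤ PySem.List.len h) :
    IsWMin h w i (i + (innerA h w i).2) (innerA h w i).1 := by
  have hglob : innerA h w i =
      (PySem.List.pyRange 0 w 1).foldl
        (fun (s : Int × Int) j =>
          if PySem.List.pyGetD h (i + j) 0 < s.1 then (PySem.List.pyGetD h (i + j) 0, j) else s)
        (PySem.List.pyGetD h i 0, 0) := by
    unfold innerA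
    rw [slice_getD h i w 0 hi le_rfl (by omega) hlen, add_zero]
    apply PySem.List.foldl_congr_mem
    intro acc j hj
    rw [PySem.List.mem_pyRange_one] at hj
    rw [slice_getD h i w j hi hj.1 hj.2 hlen]
  obtain ⟨k, rfl⟩ : ∃ k : Nat, w = (k : Int) + 1 := ⟨(w - 1).toNat, by omega⟩
  rw [hglob]
  exact afold_spec h i k

-- the invariant carried across windows
def WInv (h : List Int) (w : Int) (k : Nat) : Prop :=
  (foldA h w k).items = (foldB h w k).1 ∧
  (k = 0 → foldB h w k = ([], -1, 0)) ∧
  (0 < k →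
    (∃ pre, (foldB h w k).1 = pre ++ [(foldB h w k).2]) ∧
    ((foldB h w k).1.map Prod.fst).Pairwise (· < ·) ∧
    (∀ x ∈ (foldB h w k).1.map Prod.fst, x ≤ (foldB h w k).2.1) ∧
    IsWMin h w ((k : Int) - 1) (foldB h w k).2.1 (foldB h w k).2.2)

theorem main_inv (h : List Int) (w : Int) (hw : 1 ≤ w) :
    ∀ k : Nat, (k : Int) + w - 1 ≤ PySem.List.len h → WInv h w k := by
  intro k
  induction k with
  | zero =>
    intro _
    have hnil : PySem.List.pyRange 0 ((0 : Nat) : Int) 1 = [] := by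
      rw [Nat.cast_zero, PySem.List.pyRange_one_eq_nil le_rfl]
    refine ⟨?_, fun _ => ?_, fun hk => absurd hk (lt_irrefl 0)⟩
    · unfold foldA foldB; rw [hnil]; rfl
    · unfold foldB; rw [hnil]; rfl
  | succ k ih =>
    intro hlen
    obtain ⟨hitems, hzero, hpos⟩ := ih (by omega)
    have hsplit : PySem.List.pyRange 0 ((k + 1 : Nat) : Int) 1 =
        PySem.List.pyRange 0 (k : Int) 1 ++ [(k : Int)] := by
      rw [show ((k + 1 : Nat) : Int) = (k : Int) + 1 by push_cast; ring,
          PySem.List.pyRange_one_succ_right (by omega)]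
    have hA : foldA h w (k + 1) = stepA h w (foldA h w k) (k : Int) := by
      unfold foldA; rw [hsplit, List.foldl_append]; rfl
    have hB : foldB h w (k + 1) = stepB h w (foldB h w k) (k : Int) := by
      unfold foldB; rw [hsplit, List.foldl_append]; rfl
    have hlen' : (k : Int) + w ≤ PySem.List.len h := by omega
    -- the new pair is the leftmost minimum of window k
    have hpv : IsWMin h w (k : Int) (newpv h w (foldB h w k) (k : Int)).1
        (newpv h w (foldB h w k) (k : Int)).2 := by
      rcases Nat.eq_zero_or_pos k with hk0 | hk0
      · subst hk0
        rw [hzero rfl]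
        unfold newpv
        rw [if_pos (by norm_num)]
        exact rescanB_min h w _ hw
      · obtain ⟨_, _, _, hspec⟩ := hpos hk0
        unfold newpv
        split_ifs with hlt hq
        · exact rescanB_min h w _ hw
        · have hpi : (k : Int) ≤ (foldB h w k).2.1 := by omega
          have := incr_spec (i := (k : Int)) hspec hpi
          rw [if_pos hq] at this
          exact this
        · have hpi : (k : Int) ≤ (foldB h w k).2.1 := by omega
          have := incr_spec (i := (k : Int)) hspec hpi
          rw [if_neg hq] at this
          exact this
    -- A's pair equals B's pair
    have hap := innerA_min h w (k : Int) hw (by omega) hlen'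
    obtain ⟨hp_eq, hv_eq⟩ := IsWMin.uniq hap hpv
    have hcont_key : (k : Int) + (innerA h w (k : Int)).2 = (newpv h w (foldB h w k) (k : Int)).1 := hp_eq
    rcases Nat.eq_zero_or_pos k with hk0 | hk0
    · -- first window: dict and list both become the singleton [pv]
      subst hk0
      have hb0 : foldB h w 0 = ([], -1, 0) := hzero rfl
      have ha0 : foldA h w 0 = PySem.Dict.empty := by
        unfold foldA
        rw [Nat.cast_zero, PySem.List.pyRange_one_eq_nil le_rfl]
        rfl
      have hcont : (PySem.Dict.empty : PySem.Dict Int Int).contains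
          (((0 : Nat) : Int) + (innerA h w ((0 : Nat) : Int)).2) = false :=
        PySem.Dict.contains_empty _
      have hAstep : foldA h w 1 = PySem.Dict.empty.insert
          (((0 : Nat) : Int) + (innerA h w ((0 : Nat) : Int)).2) (innerA h w ((0 : Nat) : Int)).1 := by
        rw [hA, ha0, stepA_eq, if_neg (by rw [hcont]; simp)]
      have hBstep : foldB h w 1 =
          ([newpv h w (foldB h w 0) ((0 : Nat) : Int)], newpv h w (foldB h w 0) ((0 : Nat) : Int)) := by
        rw [hB, stepB_eq, hb0, if_pos (Or.inl rfl), List.nil_append]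
      refine ⟨?_, fun habs => absurd habs (by omega), fun _ => ?_⟩
      · rw [hAstep, hBstep]
        dsimp only
        rw [PySem.Dict.items_insert_of_not_contains _ _ hcont]
        have hie : (PySem.Dict.empty : PySem.Dict Int Int).items = [] := rfl
        rw [hie, List.nil_append, hcont_key, hv_eq, Prod.mk.eta]
      · rw [hBstep]
        dsimp only
        refine ⟨⟨[], by simp⟩, by simp, by simp, ?_⟩
        rw [show (((0 : Nat) + 1 : Nat) : Int) - 1 = ((0 : Nat) : Int) by simp]
        exact hpv
    · obtain ⟨⟨pre, hpre⟩, hpw, hbd, hspec⟩ := hpos hk0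
      have hmono : (foldB h w k).2.1 ≤ (newpv h w (foldB h w k) (k : Int)).1 := by
        have hspec2 : IsWMin h w (((k : Int) - 1) + 1) (newpv h w (foldB h w k) (k : Int)).1
            (newpv h w (foldB h w k) (k : Int)).2 := by
          rw [show ((k : Int) - 1) + 1 = (k : Int) by ring]; exact hpv
        exact IsWMin.mono hspec hspec2
      have hne : (foldB h w k).1 ≠ [] := by rw [hpre]; simp
      have hlast : (PySem.List.pyGetD (foldB h w k).1 (-1) ((0 : Int), (0 : Int))) = (foldB h w k).2 := by
        rw [hpre]; exact PySem.List.pyGetD_neg_one_append_singleton _ _ _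
      have hkeys : (foldA h w k).keys = (foldB h w k).1.map Prod.fst := by
        rw [← hitems]; rfl
      by_cases heq : (newpv h w (foldB h w k) (k : Int)).1 = (foldB h w k).2.1
      · -- same position: value also equal, nothing changes on either side
        have hveq : (newpv h w (foldB h w k) (k : Int)).2 = (foldB h w k).2.2 := by
          obtain ⟨_, _, c1, _, _⟩ := hpv
          obtain ⟨_, _, c2, _, _⟩ := hspec
          rw [c1, c2, heq]
        have hpveq : newpv h w (foldB h w k) (k : Int) = (foldB h w k).2 :=
          Prod.ext_iff.mpr ⟨heq, hveq⟩
        have hcont : (foldA h w k).contains ((k : Int) + (innerA h w (k : Int)).2) = true := by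
          rw [PySem.Dict.contains_iff_mem_keys, hkeys, hcont_key, hpveq, hpre]
          simp
        have hAstep : foldA h w (k + 1) = foldA h w k := by
          rw [hA, stepA_eq, if_pos hcont]
        have hBstep : foldB h w (k + 1) = foldB h w k := by
          rw [hB, stepB_eq, if_neg (by
            rw [not_or, hlast]
            exact ⟨hne, not_not_intro heq.symm⟩), hpveq]
        refine ⟨?_, fun habs => absurd habs (by omega), fun _ => ?_⟩
        · rw [hAstep, hBstep, hitems]
        · rw [hBstep]
          refine ⟨⟨pre, hpre⟩, hpw, hbd, ?_⟩
          rw [show ((k + 1 : Nat) : Int) - 1 = (k : Int) by push_cast; ring]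
          rw [← hpveq] at hspec ⊢
          exact hpv
      · -- new position: appended on both sides
        have hgt : (foldB h w k).2.1 < (newpv h w (foldB h w k) (k : Int)).1 := by
          omega
        have hcont : (foldA h w k).contains ((k : Int) + (innerA h w (k : Int)).2) = false := by
          rw [← Bool.not_eq_true]
          intro hc
          have hmem := (PySem.Dict.contains_iff_mem_keys _ _).mp hc
          rw [hkeys, hcont_key] at hmem
          have := hbd _ hmem
          omega
        have hAstep : foldA h w (k + 1) = (foldA h w k).insert
            ((k : Int) + (innerA h w (k : Int)).2) (innerA h w (k : Int)).1 := by
          rw [hA, stepA_eq, if_neg (by rw [hcont]; simp)]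
        have hBstep : foldB h w (k + 1) =
            ((foldB h w k).1 ++ [newpv h w (foldB h w k) (k : Int)],
              newpv h w (foldB h w k) (k : Int)) := by
          rw [hB, stepB_eq, if_pos (Or.inr (by rw [hlast]; omega))]
        refine ⟨?_, fun habs => absurd habs (by omega), fun _ => ?_⟩
        · rw [hAstep, hBstep]
          dsimp only
          rw [PySem.Dict.items_insert_of_not_contains _ _ hcont, hitems, hcont_key, hv_eq,
              Prod.mk.eta]
        · rw [hBstep]
          dsimp only
          refine ⟨⟨(foldB h w k).1, rfl⟩, ?_, ?_, ?_⟩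
          · rw [List.map_append, List.pairwise_append]
            refine ⟨hpw, by simp, ?_⟩
            intro a ha b hb
            simp only [List.map_cons, List.map_nil, List.mem_singleton] at hb
            subst hb
            have := hbd a ha
            omega
          · intro x hx
            rw [List.map_append, List.mem_append] at hx
            rcases hx with hx | hx
            · have := hbd x hx; omega
            · simp only [List.map_cons, List.map_nil, List.mem_singleton] at hx
              omega
          · rw [show ((k + 1 : Nat) : Int) - 1 = (k : Int) by push_cast; ring]
            exact hpv

-- dict(out) returns out itself when out's keys are strictly increasing
theorem ofList_items_of_nodup (out : List (Int × Int))
    (hpw : (out.map Prod.fst).Pairwise (· < ·)) :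
    (PySem.Dict.ofList out).items = out := by
  have hofl : PySem.Dict.ofList out =
      out.foldl (fun d a => d.insert a.1 a.2) PySem.Dict.empty := rfl
  rw [hofl]
  rw [PySem.Dict.items_foldl_insert_fresh out Prod.fst Prod.snd PySem.Dict.empty
    (fun a _ => PySem.Dict.contains_empty _) (hpw.imp (fun hab => ne_of_lt hab))]
  have hie : (PySem.Dict.empty : PySem.Dict Int Int).items = [] := rfl
  rw [hie, List.nil_append]
  simp

-- ===== VERDICT (by name: the statement is the Claim_ definition above) =====
theorem winnowing_spec : Claim_equal_winnowing := by
  intro hashlist t n _ hpre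
  rw [Pre_winnowing] at hpre
  rw [Spec_winnowing]
  have hw : 1 ≤ t - n + 1 := by omega
  by_cases hN : PySem.List.len hashlist - (t - n + 1) + 1 ≤ 0
  · simp only [winnowing, winnowing_alt]
    rw [PySem.List.pyRange_one_eq_nil hN]
    rfl
  · have hNc : (((PySem.List.len hashlist - (t - n + 1) + 1).toNat : Nat) : Int) =
        PySem.List.len hashlist - (t - n + 1) + 1 := by omega
    have eA : winnowing hashlist t n =
        (foldA hashlist (t - n + 1) (PySem.List.len hashlist - (t - n + 1) + 1).toNat).items := by
      simp only [winnowing]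
      rw [← hNc]
      rfl
    have eB : winnowing_alt hashlist t n =
        (PySem.Dict.ofList
          (foldB hashlist (t - n + 1) (PySem.List.len hashlist - (t - n + 1) + 1).toNat).1).items := by
      simp only [winnowing_alt]
      rw [← hNc]
      rfl
    obtain ⟨hitems, _, hpos⟩ :=
      main_inv hashlist (t - n + 1) hw (PySem.List.len hashlist - (t - n + 1) + 1).toNat
        (by omega)
    have hk0 : 0 < (PySem.List.len hashlist - (t - n + 1) + 1).toNat := by omega
    obtain ⟨_, hpw, _, _⟩ := hpos hk0
    rw [eA, eB, hitems, ofList_items_of_nodup _ hpw]
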